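-- pv_equiv track=rewrite | github.com/masein/accounting-assistant-web | app/services/reporting/uk_statement_service.py | _pl_bucket_for_code
-- ===== SOURCE A (Python) =====
-- _UK_PL_MAP: list[tuple[str, str]] = [
--     ("4000", "turnover"),
--     ("4100", "turnover"),         # sales returns — sign is captured by ledger direction
--     ("4200", "other_operating_income"),
--     ("5", "cost_of_sales"),
--     ("70", "distribution_costs"),
--     ("71", "admin_expenses"),
--     ("72", "admin_expenses"),
--     ("73", "admin_expenses"),
--     ("74", "admin_expenses"),
--     ("75", "admin_expenses"),
--     ("76", "admin_expenses"),
--     ("77", "admin_expenses"),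
--     ("78", "admin_expenses"),
--     ("79", "admin_expenses"),
--     ("8000", "admin_expenses"),    # bank charges
--     ("8500", "admin_expenses"),    # depreciation
--     ("8600", "admin_expenses"),    # amortisation
--     ("8100", "interest_payable"),
--     ("8200", "interest_payable"),
--     ("8300", "interest_receivable"),
--     ("8400", "investment_income"),
--     ("9", "tax_on_profit"),
-- ]
--
-- def _pl_bucket_for_code(code: str) -> str | None:
--     c = (code or "").strip()
--     if not c:
--         return None
--     for prefix, bucket in _UK_PL_MAP:
--         if c.startswith(prefix):
--             return bucket
--     return None
-- ===== SOURCE B (Python) =====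
-- # B: hand-rolled decision tree on the leading digit (and second digit / 4-char
-- # prefix where needed), replacing the linear first-match scan over the table.
--
-- def _pl_bucket_for_code(code: str) -> str | None:
--     c = (code or "").strip()
--     if not c:
--         return None
--     head = c[:1]
--     if head == "5":
--         return "cost_of_sales"
--     if head == "9":
--         return "tax_on_profit"
--     if head == "7":
--         d = c[1:2]
--         if d == "0":
--             return "distribution_costs"
--         if d in ("1", "2", "3", "4", "5", "6", "7", "8", "9"):
--             return "admin_expenses"
--         return None
--     p4 = c[:4]
--     if head == "4":
--         if p4 in ("4000", "4100"):
--             return "turnover"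
--         if p4 == "4200":
--             return "other_operating_income"
--         return None
--     if head == "8":
--         if p4 in ("8000", "8500", "8600"):
--             return "admin_expenses"
--         if p4 in ("8100", "8200"):
--             return "interest_payable"
--         if p4 == "8300":
--             return "interest_receivable"
--         if p4 == "8400":
--             return "investment_income"
--         return None
--     return None
-- ===== Notes on version B (the rewrite author's own statement) =====
-- stated objective: alternative
-- what changed: Replaces the linear first-match scan over the 22-entry prefix list with a hand-rolled decision tree that branches on the leading digit and then on the second digit (7x range) or the 4-character prefix (4xxx/8xxx); correct because the table's prefixes never nest, so the result depends only on those characters.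
import Mathlib
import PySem

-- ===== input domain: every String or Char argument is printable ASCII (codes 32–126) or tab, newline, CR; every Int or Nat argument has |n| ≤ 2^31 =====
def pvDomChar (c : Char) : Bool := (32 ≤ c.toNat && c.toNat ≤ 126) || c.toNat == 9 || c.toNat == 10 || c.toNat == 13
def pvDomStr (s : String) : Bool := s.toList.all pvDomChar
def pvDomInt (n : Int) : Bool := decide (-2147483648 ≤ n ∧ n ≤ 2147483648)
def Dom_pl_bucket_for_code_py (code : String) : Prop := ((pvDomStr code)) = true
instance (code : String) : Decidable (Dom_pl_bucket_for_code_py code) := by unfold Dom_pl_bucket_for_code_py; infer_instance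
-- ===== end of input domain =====

-- B replaces A's first-match scan over the 22-entry prefix table by a hand-rolled decision
-- tree on the leading digit (and the second digit / 4-char prefix where needed); same result.

-- ===== PORT A =====
def ukPlMap : List (String × String) := [
  ("4000", "turnover"),
  ("4100", "turnover"),
  ("4200", "other_operating_income"),
  ("5", "cost_of_sales"),
  ("70", "distribution_costs"),
  ("71", "admin_expenses"),
  ("72", "admin_expenses"),
  ("73", "admin_expenses"),
  ("74", "admin_expenses"),
  ("75", "admin_expenses"),
  ("76", "admin_expenses"),
  ("77", "admin_expenses"),
  ("78", "admin_expenses"),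
  ("79", "admin_expenses"),
  ("8000", "admin_expenses"),
  ("8500", "admin_expenses"),
  ("8600", "admin_expenses"),
  ("8100", "interest_payable"),
  ("8200", "interest_payable"),
  ("8300", "interest_receivable"),
  ("8400", "investment_income"),
  ("9", "tax_on_profit")]

-- the loop 'for prefix, bucket in _UK_PL_MAP: if c.startswith(prefix): return bucket'
def plScanA (c : String) : List (String × String) → Option String
  | [] => none
  | (p, b) :: rest => if PySem.Str.startswith c p then some b else plScanA c rest

def pl_bucket_for_code_py (code : String) : Option String :=
  let c := PySem.Str.strip code   -- (code or "").strip(): '' is falsy and strips to '' anyway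
  if c = "" then none
  else plScanA c ukPlMap

-- ===== PORT B =====
-- the decision-tree body of Source B after the strip/empty guard
def plTree (c : String) : Option String :=
  let head := PySem.Str.slice c none (some 1)      -- c[:1]
  if head = "5" then some "cost_of_sales"
  else if head = "9" then some "tax_on_profit"
  else if head = "7" then
    let d := PySem.Str.slice c (some 1) (some 2)   -- c[1:2]
    if d = "0" then some "distribution_costs"
    else if d = "1" ∨ d = "2" ∨ d = "3" ∨ d = "4" ∨ d = "5" ∨ d = "6" ∨ d = "7" ∨ d = "8" ∨ d = "9"
      then some "admin_expenses"
    else none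
  else
    let p4 := PySem.Str.slice c none (some 4)      -- c[:4]
    if head = "4" then
      if p4 = "4000" ∨ p4 = "4100" then some "turnover"
      else if p4 = "4200" then some "other_operating_income"
      else none
    else if head = "8" then
      if p4 = "8000" ∨ p4 = "8500" ∨ p4 = "8600" then some "admin_expenses"
      else if p4 = "8100" ∨ p4 = "8200" then some "interest_payable"
      else if p4 = "8300" then some "interest_receivable"
      else if p4 = "8400" then some "investment_income"
      else none
    else none

def pl_bucket_for_code_py_alt (code : String) : Option String :=
  let c := PySem.Str.strip code
  if c = "" then none
  else plTree c

-- ===== PRECONDITION & SPEC =====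
def Spec_pl_bucket_for_code_py (code : String) (out : Option String) : Prop := out = pl_bucket_for_code_py_alt code
instance (code : String) (out : Option String) : Decidable (Spec_pl_bucket_for_code_py code out) := by unfold Spec_pl_bucket_for_code_py; infer_instance

-- ===== CLAIM (what is proved, stated in full; the proofs are below) =====
def Claim_equal_pl_bucket_for_code_py : Prop := ∀ (code : String), Dom_pl_bucket_for_code_py code → Spec_pl_bucket_for_code_py code (pl_bucket_for_code_py code)

-- ===== LEMMAS AND PROOFS =====

theorem str_eq_iff (s t : String) : s = t ↔ s.toList = t.toList := by
  constructor
  · rintro rfl; rfl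
  · intro h
    have := congrArg String.ofList h
    simpa using this

theorem slice12 {α : Type} (l : List α) :
    PySem.List.slice l (some 1) (some 2) = (l.drop 1).take 1 := by
  rw [PySem.List.slice_toNat] <;> first | rfl | norm_num

theorem prefix_iff_take_eq {α : Type} (l₁ l₂ : List α) : l₁ <+: l₂ ↔ List.take l₁.length l₂ = l₁ := by
  rw [List.prefix_iff_eq_take, eq_comm]

-- normal form of A's scan on a non-empty stripped string a :: t
def specA (a : Char) (t : List Char) : Option String :=
  if a = '4' ∧ List.take 3 t = ['0', '0', '0'] then some "turnover"
  else if a = '4' ∧ List.take 3 t = ['1', '0', '0'] then some "turnover"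
  else if a = '4' ∧ List.take 3 t = ['2', '0', '0'] then some "other_operating_income"
  else if a = '5' then some "cost_of_sales"
  else if a = '7' ∧ List.take 1 t = ['0'] then some "distribution_costs"
  else if a = '7' ∧ List.take 1 t = ['1'] then some "admin_expenses"
  else if a = '7' ∧ List.take 1 t = ['2'] then some "admin_expenses"
  else if a = '7' ∧ List.take 1 t = ['3'] then some "admin_expenses"
  else if a = '7' ∧ List.take 1 t = ['4'] then some "admin_expenses"
  else if a = '7' ∧ List.take 1 t = ['5'] then some "admin_expenses"
  else if a = '7' ∧ List.take 1 t = ['6'] then some "admin_expenses"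
  else if a = '7' ∧ List.take 1 t = ['7'] then some "admin_expenses"
  else if a = '7' ∧ List.take 1 t = ['8'] then some "admin_expenses"
  else if a = '7' ∧ List.take 1 t = ['9'] then some "admin_expenses"
  else if a = '8' ∧ List.take 3 t = ['0', '0', '0'] then some "admin_expenses"
  else if a = '8' ∧ List.take 3 t = ['5', '0', '0'] then some "admin_expenses"
  else if a = '8' ∧ List.take 3 t = ['6', '0', '0'] then some "admin_expenses"
  else if a = '8' ∧ List.take 3 t = ['1', '0', '0'] then some "interest_payable"
  else if a = '8' ∧ List.take 3 t = ['2', '0', '0'] then some "interest_payable"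
  else if a = '8' ∧ List.take 3 t = ['3', '0', '0'] then some "interest_receivable"
  else if a = '8' ∧ List.take 3 t = ['4', '0', '0'] then some "investment_income"
  else if a = '9' then some "tax_on_profit"
  else none

-- normal form of B's decision tree on a non-empty stripped string a :: t
def specB (a : Char) (t : List Char) : Option String :=
  if a = '5' then some "cost_of_sales"
  else if a = '9' then some "tax_on_profit"
  else if a = '7' then
    if List.take 1 t = ['0'] then some "distribution_costs"
    else if List.take 1 t = ['1'] ∨ List.take 1 t = ['2'] ∨ List.take 1 t = ['3'] ∨
            List.take 1 t = ['4'] ∨ List.take 1 t = ['5'] ∨ List.take 1 t = ['6'] ∨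
            List.take 1 t = ['7'] ∨ List.take 1 t = ['8'] ∨ List.take 1 t = ['9']
      then some "admin_expenses"
    else none
  else if a = '4' then
    if List.take 3 t = ['0', '0', '0'] ∨ List.take 3 t = ['1', '0', '0'] then some "turnover"
    else if List.take 3 t = ['2', '0', '0'] then some "other_operating_income"
    else none
  else if a = '8' then
    if List.take 3 t = ['0', '0', '0'] ∨ List.take 3 t = ['5', '0', '0'] ∨ List.take 3 t = ['6', '0', '0']
      then some "admin_expenses"
    else if List.take 3 t = ['1', '0', '0'] ∨ List.take 3 t = ['2', '0', '0'] then some "interest_payable"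
    else if List.take 3 t = ['3', '0', '0'] then some "interest_receivable"
    else if List.take 3 t = ['4', '0', '0'] then some "investment_income"
    else none
  else none

set_option maxHeartbeats 1000000 in
theorem scanA_norm (a : Char) (t : List Char) :
    plScanA (String.ofList (a :: t)) ukPlMap = specA a t := by
  simp only [plScanA, ukPlMap, PySem.Str.startswith_eq, PySem.Chars.startswith_iff]
  simp [prefix_iff_take_eq, List.take_succ_cons, specA]

set_option maxHeartbeats 1000000 in
theorem treeB_norm (a : Char) (t : List Char) :
    plTree (String.ofList (a :: t)) = specB a t := by
  simp only [plTree, str_eq_iff, PySem.Str.toList_slice]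
  simp [PySem.List.slice_to, slice12, List.take_succ_cons, specB]
  split_ifs <;> simp_all

set_option maxHeartbeats 1000000 in
theorem spec_eq (a : Char) (t : List Char) : specA a t = specB a t := by
  by_cases h4 : a = '4'
  · subst h4; simp [specA, specB]; split_ifs <;> simp_all
  by_cases h5 : a = '5'
  · subst h5; simp [specA, specB]
  by_cases h7 : a = '7'
  · subst h7; simp [specA, specB]; split_ifs <;> simp_all
  by_cases h8 : a = '8'
  · subst h8; simp [specA, specB]; split_ifs <;> simp_all
  by_cases h9 : a = '9'
  · subst h9; simp [specA, specB, h4, h5, h7, h8]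
  simp [specA, specB, h4, h5, h7, h8, h9]

theorem pl_key (c : String) : plScanA c ukPlMap = plTree c := by
  obtain ⟨l, rfl⟩ : ∃ l, c = String.ofList l := ⟨c.toList, by simp⟩
  match l with
  | [] => decide
  | a :: t => rw [scanA_norm, treeB_norm, spec_eq]

-- ===== VERDICT (by name: the statement is the Claim_ definition above) =====
theorem pl_bucket_for_code_py_spec : Claim_equal_pl_bucket_for_code_py := by
  intro code _
  unfold Spec_pl_bucket_for_code_py pl_bucket_for_code_py pl_bucket_for_code_py_alt
  simp only [pl_key]
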